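-- pv_equiv track=rewrite | github.com/minseo25/Korean-Speech-Labeling | src/postprocess_labels.py | find_all_duplicate_transcripts
-- ===== SOURCE A (Python) =====
-- def find_all_duplicate_transcripts(transcripts: list, min_count: int = 2) -> list:
--     results = []
--     consecutive = 1
--     for i in range(1, len(transcripts)):
--         if transcripts[i] == transcripts[i-1]:
--             consecutive += 1
--         else:
--             if consecutive >= min_count:
--                 results.append((i - consecutive, consecutive))
--             consecutive = 1
--     if consecutive >= min_count:  # Check at the end of the list
--         results.append((len(transcripts) - consecutive, consecutive))
--     return results
-- ===== SOURCE B (Python) =====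
-- def find_all_duplicate_transcripts(transcripts: list, min_count: int = 2) -> list:
--     results = []
--     i, n = 0, len(transcripts)
--     while i < n:
--         j = i
--         while j < n and transcripts[j] == transcripts[i]:
--             j += 1
--         if j - i >= min_count:
--             results.append((i, j - i))
--         i = j
--     return results
-- ===== Notes on version B (the rewrite author's own statement) =====
-- stated objective: simpler
-- what changed: Replaces A's running-counter-with-end-flush over adjacent index pairs by a two-pointer scan that finds each run of equal transcripts directly.
-- intended difference: On an empty list with min_count <= 1, A's end-of-loop flush returns [(-1, 1)], a nonsense run in a list with no elements; B returns [], the intended answer for an empty input. — e.g. on find_all_duplicate_transcripts([], 1): A returns [(-1, 1)], B returns []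
import Mathlib
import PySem

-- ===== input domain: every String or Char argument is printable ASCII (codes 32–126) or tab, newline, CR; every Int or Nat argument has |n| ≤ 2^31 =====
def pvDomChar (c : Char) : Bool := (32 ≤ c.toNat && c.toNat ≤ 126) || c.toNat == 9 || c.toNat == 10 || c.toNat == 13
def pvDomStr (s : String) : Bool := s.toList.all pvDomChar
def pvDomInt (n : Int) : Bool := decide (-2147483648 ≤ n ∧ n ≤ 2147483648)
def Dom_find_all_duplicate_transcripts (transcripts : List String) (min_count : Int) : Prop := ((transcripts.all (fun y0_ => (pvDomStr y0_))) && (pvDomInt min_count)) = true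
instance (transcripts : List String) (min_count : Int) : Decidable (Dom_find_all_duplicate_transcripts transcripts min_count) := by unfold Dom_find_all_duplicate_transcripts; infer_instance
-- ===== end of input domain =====

-- Re-implementation note: B finds each run of equal transcripts with a two-pointer scan
-- (split off the run, emit it if long enough) instead of A's adjacent-pair counter with an
-- end-of-list flush; objective: simpler. Return value only; no argument is mutated.

-- ===== PORT A =====
-- A: results/consecutive state folded over 'for i in range(1, len(transcripts))', then the final flush.
def find_all_duplicate_transcripts (transcripts : List String) (min_count : Int) : List (Int × Int) :=
  let n : Int := PySem.List.len transcripts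
  let st := (PySem.List.pyRange 1 n 1).foldl
    (fun (st : List (Int × Int) × Int) (i : Int) =>
      if PySem.List.pyGetD transcripts i "" = PySem.List.pyGetD transcripts (i - 1) "" then
        (st.1, st.2 + 1)
      else
        ((if st.2 ≥ min_count then st.1 ++ [(i - st.2, st.2)] else st.1), 1))
    ([], 1)
  if st.2 ≥ min_count then st.1 ++ [(n - st.2, st.2)] else st.1

-- ===== PORT B =====
-- B helper: the inner 'while j < n and transcripts[j] == transcripts[i]' — split off the run of x:
-- returns (number of further copies of x at the front, the remainder of the list).
def pvSplitRun (x : String) : List String → Nat × List String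
  | [] => (0, [])
  | y :: ys => if y = x then let p := pvSplitRun x ys; (p.1 + 1, p.2) else (0, y :: ys)

-- B outer loop ('while i < n'): at position 'start', split off the run, emit it if long enough,
-- continue after it. The Nat argument is fuel bounding the remaining loop iterations (each
-- iteration consumes at least one element); started with the list's length it is never exhausted.
def pvAltGo (mc : Int) (start : Int) : Nat → List String → List (Int × Int)
  | _, [] => []
  | 0, _ :: _ => []
  | f + 1, x :: rest =>
      let p := pvSplitRun x rest
      (if (p.1 + 1 : Int) ≥ mc then [(start, (p.1 + 1 : Int))] else []) ++
        pvAltGo mc (start + (p.1 + 1)) f p.2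

def find_all_duplicate_transcripts_alt (transcripts : List String) (min_count : Int) : List (Int × Int) :=
  pvAltGo min_count 0 transcripts.length transcripts

-- ===== PRECONDITION & SPEC =====
-- On the empty list with min_count <= 1, A's unconditional end-of-loop flush returns [(-1, 1)]
-- (a "run" at index -1 of a list with no elements); B returns [], the intended answer.
def D_find_all_duplicate_transcripts (transcripts : List String) (min_count : Int) : Prop :=
  transcripts = [] ∧ min_count ≤ 1
instance (transcripts : List String) (min_count : Int) : Decidable (D_find_all_duplicate_transcripts transcripts min_count) := by unfold D_find_all_duplicate_transcripts; infer_instance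
def Spec_find_all_duplicate_transcripts (transcripts : List String) (min_count : Int) (out : List (Int × Int)) : Prop := ¬ D_find_all_duplicate_transcripts transcripts min_count → out = find_all_duplicate_transcripts_alt transcripts min_count
instance (transcripts : List String) (min_count : Int) (out : List (Int × Int)) : Decidable (Spec_find_all_duplicate_transcripts transcripts min_count out) := by unfold Spec_find_all_duplicate_transcripts; infer_instance
def pvDiffWitness_find_all_duplicate_transcripts : List String × Int := ([], 1)
def pvDiffWitnessOut_find_all_duplicate_transcripts : (List (Int × Int)) × (List (Int × Int)) := ([(-1, 1)], [])

-- ===== CLAIM (what is proved, stated in full; the proofs are below) =====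
def Claim_unchanged_find_all_duplicate_transcripts : Prop := ∀ (transcripts : List String) (min_count : Int), Dom_find_all_duplicate_transcripts transcripts min_count → Spec_find_all_duplicate_transcripts transcripts min_count (find_all_duplicate_transcripts transcripts min_count)
def Claim_changed_find_all_duplicate_transcripts : Prop := Dom_find_all_duplicate_transcripts (pvDiffWitness_find_all_duplicate_transcripts.1) (pvDiffWitness_find_all_duplicate_transcripts.2) ∧ D_find_all_duplicate_transcripts (pvDiffWitness_find_all_duplicate_transcripts.1) (pvDiffWitness_find_all_duplicate_transcripts.2) ∧ find_all_duplicate_transcripts (pvDiffWitness_find_all_duplicate_transcripts.1) (pvDiffWitness_find_all_duplicate_transcripts.2) = pvDiffWitnessOut_find_all_duplicate_transcripts.1 ∧ find_all_duplicate_transcripts_alt (pvDiffWitness_find_all_duplicate_transcripts.1) (pvDiffWitness_find_all_duplicate_transcripts.2) = pvDiffWitnessOut_find_all_duplicate_transcripts.2 ∧ pvDiffWitnessOut_find_all_duplicate_transcripts.1 ≠ pvDiffWitnessOut_find_all_duplicate_transcripts.2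
def Claim_exact_find_all_duplicate_transcripts : Prop := ∀ (transcripts : List String) (min_count : Int), Dom_find_all_duplicate_transcripts transcripts min_count → D_find_all_duplicate_transcripts transcripts min_count → find_all_duplicate_transcripts transcripts min_count ≠ find_all_duplicate_transcripts_alt transcripts min_count

-- ===== LEMMAS AND PROOFS =====

theorem pvSplitRun_len_le (x : String) (l : List String) : (pvSplitRun x l).2.length ≤ l.length := by
  induction l with
  | nil => simp [pvSplitRun]
  | cons y ys ih =>
    simp only [pvSplitRun]
    split
    · simpa using Nat.le_succ_of_le ih
    · simp

theorem pvSplitRun_cons_eq (x y : String) (ys : List String) (h : y = x) :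
    pvSplitRun x (y :: ys) = ((pvSplitRun x ys).1 + 1, (pvSplitRun x ys).2) := by
  simp [pvSplitRun, h]

theorem pvSplitRun_cons_ne (x y : String) (ys : List String) (h : ¬ y = x) :
    pvSplitRun x (y :: ys) = (0, y :: ys) := by
  simp [pvSplitRun, h]

theorem pvAltGo_nil (mc s : Int) (f : Nat) : pvAltGo mc s f [] = [] := by
  cases f <;> rfl

theorem pvAltGo_cons (mc s : Int) (f : Nat) (x : String) (rest : List String) :
    pvAltGo mc s (f + 1) (x :: rest) =
      (if ((pvSplitRun x rest).1 + 1 : Int) ≥ mc then [(s, ((pvSplitRun x rest).1 + 1 : Int))] else []) ++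
        pvAltGo mc (s + ((pvSplitRun x rest).1 + 1)) f (pvSplitRun x rest).2 := rfl

theorem pvAltGo_congr (mc : Int) : ∀ (f1 : Nat) (s : Int) (f2 : Nat) (l : List String),
    l.length ≤ f1 → l.length ≤ f2 → pvAltGo mc s f1 l = pvAltGo mc s f2 l := by
  intro f1
  induction f1 with
  | zero =>
    intro s f2 l h1 _
    have : l = [] := List.eq_nil_of_length_eq_zero (Nat.le_zero.mp h1)
    subst this; rw [pvAltGo_nil, pvAltGo_nil]
  | succ g ih =>
    intro s f2 l h1 h2
    cases l with
    | nil => rw [pvAltGo_nil, pvAltGo_nil]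
    | cons x rest =>
      cases f2 with
      | zero => simp at h2
      | succ g2 =>
        rw [pvAltGo_cons, pvAltGo_cons]
        congr 1
        exact ih _ g2 _ (le_trans (pvSplitRun_len_le x rest) (Nat.lt_succ_iff.mp h1))
          (le_trans (pvSplitRun_len_le x rest) (Nat.lt_succ_iff.mp h2))

-- Structural model of A's loop: acc = emitted runs, the current run started at runStart,
-- has length c so far, its last element is prev, and rest is what is still to be scanned.
def pvModelA (mc : Int) (acc : List (Int × Int)) (runStart : Int) (c : Int) (prev : String) : List String → List (Int × Int)
  | [] => if c ≥ mc then acc ++ [(runStart, c)] else acc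
  | y :: ys =>
    if y = prev then pvModelA mc acc runStart (c + 1) y ys
    else pvModelA mc (if c ≥ mc then acc ++ [(runStart, c)] else acc) (runStart + c) 1 y ys

theorem pvModelA_cons_eq (mc : Int) (acc : List (Int × Int)) (rs c : Int) (prev y : String) (ys : List String) (h : y = prev) :
    pvModelA mc acc rs c prev (y :: ys) = pvModelA mc acc rs (c + 1) y ys := by
  simp [pvModelA, h]

theorem pvModelA_cons_ne (mc : Int) (acc : List (Int × Int)) (rs c : Int) (prev y : String) (ys : List String) (h : ¬ y = prev) :
    pvModelA mc acc rs c prev (y :: ys) = pvModelA mc (if c ≥ mc then acc ++ [(rs, c)] else acc) (rs + c) 1 y ys := by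
  simp [pvModelA, h]

-- A's current-run state (run of length c ending at prev) continued over rest equals:
-- close the run extended by prev's continuation in rest, then B's scan of what is left.
theorem pvModelA_eq_altGo (mc : Int) (rest : List String) : ∀ (acc : List (Int × Int)) (runStart c : Int) (prev : String), 1 ≤ c →
    pvModelA mc acc runStart c prev rest =
      acc ++ ((if (c + (pvSplitRun prev rest).1 : Int) ≥ mc then [(runStart, (c + (pvSplitRun prev rest).1 : Int))] else []) ++
        pvAltGo mc (runStart + (c + (pvSplitRun prev rest).1)) (pvSplitRun prev rest).2.length (pvSplitRun prev rest).2) := by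
  induction rest with
  | nil =>
    intro acc runStart c prev hc
    simp only [pvModelA, pvSplitRun, pvAltGo_nil]
    split <;> simp_all
  | cons y ys ih =>
    intro acc runStart c prev hc
    by_cases hy : y = prev
    · subst hy
      rw [pvModelA_cons_eq mc acc runStart c y y ys rfl,
        pvSplitRun_cons_eq y y ys rfl, ih acc runStart (c + 1) y (by omega)]
      push_cast
      ring_nf
    · rw [pvModelA_cons_ne mc acc runStart c prev y ys hy,
        ih _ (runStart + c) 1 y (by omega)]
      simp only [pvSplitRun_cons_ne prev y ys hy, Nat.cast_zero, add_zero]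
      have hf : (pvSplitRun y ys).2.length ≤ ys.length := pvSplitRun_len_le y ys
      rw [show (y :: ys).length = ys.length + 1 from rfl,
        pvAltGo_cons mc (runStart + c) ys.length y ys,
        pvAltGo_congr mc (pvSplitRun y ys).2.length _ ys.length _ le_rfl hf]
      ring_nf
      split <;> simp

-- A's index fold, started after the prefix 'pre ++ [prev]' with current-run length c, is pvModelA.
theorem pvFoldA_eq_model (mc : Int) (rest : List String) : ∀ (pre : List String) (prev : String) (acc : List (Int × Int)) (c : Int),
    (let ts := pre ++ prev :: rest
     let st := (PySem.List.pyRange ((pre.length : Int) + 1) (PySem.List.len ts) 1).foldl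
       (fun (st : List (Int × Int) × Int) (i : Int) =>
         if PySem.List.pyGetD ts i "" = PySem.List.pyGetD ts (i - 1) "" then (st.1, st.2 + 1)
         else ((if st.2 ≥ mc then st.1 ++ [(i - st.2, st.2)] else st.1), 1)) (acc, c)
     if st.2 ≥ mc then st.1 ++ [((PySem.List.len ts) - st.2, st.2)] else st.1)
    = pvModelA mc acc ((pre.length : Int) + 1 - c) c prev rest := by
  induction rest with
  | nil =>
    intro pre prev acc c
    simp only [PySem.List.len]
    rw [PySem.List.pyRange_one_eq_nil (by simp)]
    simp only [List.foldl_nil, pvModelA]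
    have : ((pre ++ [prev]).length : Int) = (pre.length : Int) + 1 := by simp
    rw [this]
  | cons y ys ih =>
    intro pre prev acc c
    simp only [PySem.List.len]
    have hlen : ((pre ++ prev :: y :: ys).length : Int) = (pre.length : Int) + 1 + (1 + ys.length) := by
      simp; ring
    rw [hlen, PySem.List.pyRange_one_cons (by omega)]
    simp only [List.foldl_cons]
    have hget1 : PySem.List.pyGetD (pre ++ prev :: y :: ys) ((pre.length : Int) + 1) "" = y := by
      rw [show ((pre.length : Int) + 1) = ((pre.length + 1 : Nat) : Int) by push_cast; ring,
        PySem.List.pyGetD_natCast]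
      simp [List.getD]
    have hget0 : PySem.List.pyGetD (pre ++ prev :: y :: ys) ((pre.length : Int) + 1 - 1) "" = prev := by
      rw [show ((pre.length : Int) + 1 - 1) = ((pre.length : Nat) : Int) by ring,
        PySem.List.pyGetD_natCast]
      simp [List.getD]
    rw [hget1, hget0]
    have hpl : (((pre ++ [prev]).length : Nat) : Int) = (pre.length : Int) + 1 := by simp
    have hassoc : (pre ++ [prev]) ++ y :: ys = pre ++ prev :: y :: ys := by simp
    by_cases hy : y = prev
    · rw [if_pos hy]
      have h := ih (pre ++ [prev]) y acc (c + 1)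
      simp only [PySem.List.len, hassoc, hpl] at h
      rw [show (pre.length : Int) + 1 + (1 + (ys.length : Int)) = ((pre ++ prev :: y :: ys).length : Int) by omega]
      rw [h, pvModelA_cons_eq mc acc _ c prev y ys hy,
        show (pre.length : Int) + 1 + 1 - (c + 1) = (pre.length : Int) + 1 - c by ring]
    · rw [if_neg hy]
      have h := ih (pre ++ [prev]) y (if c ≥ mc then acc ++ [((pre.length : Int) + 1 - c, c)] else acc) 1
      simp only [PySem.List.len, hassoc, hpl] at h
      rw [show (pre.length : Int) + 1 + (1 + (ys.length : Int)) = ((pre ++ prev :: y :: ys).length : Int) by omega]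
      rw [h, pvModelA_cons_ne mc acc _ c prev y ys hy,
        show (pre.length : Int) + 1 + 1 - 1 = (pre.length : Int) + 1 - c + c by ring]

theorem pvA_eq_alt_cons (x : String) (rest : List String) (mc : Int) :
    find_all_duplicate_transcripts (x :: rest) mc = find_all_duplicate_transcripts_alt (x :: rest) mc := by
  have h := pvFoldA_eq_model mc rest [] x [] 1
  simp only [List.nil_append, List.length_nil, Nat.cast_zero, zero_add] at h
  unfold find_all_duplicate_transcripts find_all_duplicate_transcripts_alt
  simp only []
  refine Eq.trans (by exact h) ?_
  rw [pvModelA_eq_altGo mc rest [] (1 - 1) 1 x (by omega)]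
  rw [show (x :: rest).length = rest.length + 1 from rfl, pvAltGo_cons mc 0 rest.length x rest,
    pvAltGo_congr mc (pvSplitRun x rest).2.length _ rest.length _ le_rfl (pvSplitRun_len_le x rest)]
  ring_nf
  simp

-- ===== VERDICT (by name: the statement is the Claim_ definition above) =====
theorem find_all_duplicate_transcripts_spec : Claim_unchanged_find_all_duplicate_transcripts := by
  intro transcripts min_count _ hD
  match transcripts with
  | [] =>
    have hmc : ¬ min_count ≤ 1 := fun h => hD ⟨rfl, h⟩
    unfold find_all_duplicate_transcripts find_all_duplicate_transcripts_alt
    simp only [PySem.List.len, List.length_nil, Nat.cast_zero]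
    rw [PySem.List.pyRange_one_eq_nil (by omega)]
    simp only [List.foldl_nil, pvAltGo]
    rw [if_neg (by omega)]
  | x :: rest => exact pvA_eq_alt_cons x rest min_count

theorem find_all_duplicate_transcripts_changed : Claim_changed_find_all_duplicate_transcripts := by
  unfold Claim_changed_find_all_duplicate_transcripts; decide

theorem find_all_duplicate_transcripts_tight : Claim_exact_find_all_duplicate_transcripts := by
  intro transcripts min_count _ hD
  obtain ⟨h1, h2⟩ := hD
  subst h1
  unfold find_all_duplicate_transcripts find_all_duplicate_transcripts_alt
  simp only [PySem.List.len, List.length_nil, Nat.cast_zero]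
  rw [PySem.List.pyRange_one_eq_nil (by omega)]
  simp only [List.foldl_nil, pvAltGo]
  rw [if_pos (by omega)]
  simp
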